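-- pv_equiv track=rewrite | github.com/FTacke/corapan-tools | database/database_creation.py | get_left_with_sentence_bounds
-- ===== SOURCE A (Python) =====
-- def is_sentence_boundary(word_text):
--     """Prüft, ob ein Wort mit Satzschlusszeichen (., !, ?) endet."""
--     if not word_text:
--         return False
--     return word_text[-1] in ['.', '!', '?']
--
-- def get_left_with_sentence_bounds(words, center_index, max_count=10):
--     """
--     Nimmt bis zu max_count Tokens links, stoppt jedoch an Satzgrenze (., !, ?).
--     Die satzabschließende Token wird nicht mehr in den linken Kontext aufgenommen.
--     """
--     result = []
--     steps = 0
--     idx = center_index - 1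
--     while idx >= 0 and steps < max_count:
--         if is_sentence_boundary(words[idx].get('text','')):
--             break
--         result.append(words[idx])
--         steps += 1
--         idx -= 1
--     result.reverse()
--     return result
-- ===== SOURCE B (Python) =====
-- def is_sentence_boundary(word_text):
--     if not word_text:
--         return False
--     return word_text[-1] in ['.', '!', '?']
--
-- def get_left_with_sentence_bounds(words, center_index, max_count=10):
--     # Build the candidate window up front, then cut after the last sentence boundary.
--     lo = max(0, center_index - max_count)
--     hi = max(0, center_index)
--     window = words[lo:hi]
--     split = -1
--     for i, w in enumerate(window):
--         if is_sentence_boundary(w.get('text', '')):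
--             split = i
--     return window[split + 1:]
-- ===== Notes on version B (the rewrite author's own statement) =====
-- stated objective: alternative
-- what changed: Replaces the backward walk with accumulate-and-reverse by an up-front clamped slice of the left window followed by a forward scan locating the last sentence boundary and a single tail slice.
import Mathlib
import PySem

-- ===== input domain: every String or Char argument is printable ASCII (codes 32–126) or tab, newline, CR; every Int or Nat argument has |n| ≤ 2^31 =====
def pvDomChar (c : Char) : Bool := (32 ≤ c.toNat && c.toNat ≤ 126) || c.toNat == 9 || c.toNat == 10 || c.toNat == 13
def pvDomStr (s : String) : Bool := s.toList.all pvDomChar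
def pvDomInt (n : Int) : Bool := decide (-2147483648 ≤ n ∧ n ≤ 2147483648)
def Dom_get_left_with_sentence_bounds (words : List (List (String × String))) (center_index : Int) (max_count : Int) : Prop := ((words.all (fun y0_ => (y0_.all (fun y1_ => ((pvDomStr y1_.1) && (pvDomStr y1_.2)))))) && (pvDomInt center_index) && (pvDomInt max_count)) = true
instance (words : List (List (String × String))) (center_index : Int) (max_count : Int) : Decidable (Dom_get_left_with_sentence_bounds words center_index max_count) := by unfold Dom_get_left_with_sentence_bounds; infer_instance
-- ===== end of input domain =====

-- B replaces A's backward accumulate-and-reverse loop by a clamped window slice, a forward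
-- scan for the last sentence boundary, and one tail slice (alternative decomposition, same cost).
-- ===== PORT A =====
def pv_is_sentence_boundary (word_text : String) : Bool :=
  if word_text = "" then false
  else
    match PySem.Str.pyGet? word_text (-1) with
    | some c => (c == '.') || (c == '!') || (c == '?')
    | none => false

def pv_leftLoop (words : List (List (String × String))) (max_count : Int) :
    Int → Int → List (List (String × String)) → List (List (String × String)) :=
  fun idx steps result =>
    if h : 0 ≤ idx ∧ steps < max_count then
      match PySem.List.pyGet? words idx with
      | none => result   -- IndexError in Python; excluded by Pre_
      | some w =>
        if pv_is_sentence_boundary (PySem.Dict.getD (PySem.Dict.mk w) "text" "") then result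
        else pv_leftLoop words max_count (idx - 1) (steps + 1) (result ++ [w])
    else result
  termination_by idx _ _ => (idx + 1).toNat
  decreasing_by omega

def get_left_with_sentence_bounds (words : List (List (String × String))) (center_index : Int) (max_count : Int) : List (List (String × String)) :=
  (pv_leftLoop words max_count (center_index - 1) 0 []).reverse

-- ===== PORT B =====
def get_left_with_sentence_bounds_alt (words : List (List (String × String))) (center_index : Int) (max_count : Int) : List (List (String × String)) :=
  let lo := max 0 (center_index - max_count)
  let hi := max 0 center_index
  let window := PySem.List.slice words (some lo) (some hi)
  let split := (PySem.List.enumerate window).foldl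
      (fun s iw => if pv_is_sentence_boundary (PySem.Dict.getD (PySem.Dict.mk iw.2) "text" "") then iw.1 else s) (-1)
  PySem.List.slice window (some (split + 1)) none

-- ===== PRECONDITION & SPEC =====
-- Pre_ excludes exactly the inputs on which A raises IndexError (first indexed position
-- center_index-1 is past the end of words while the loop runs at all).
def Pre_get_left_with_sentence_bounds (words : List (List (String × String))) (center_index : Int) (max_count : Int) : Prop :=
  center_index ≤ (words.length : Int) ∨ max_count ≤ 0
instance (words : List (List (String × String))) (center_index : Int) (max_count : Int) : Decidable (Pre_get_left_with_sentence_bounds words center_index max_count) := by unfold Pre_get_left_with_sentence_bounds; infer_instance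

def pvWitness_get_left_with_sentence_bounds : (List (List (String × String))) × Int × Int :=
  ([[("text", "Hola.")], [("text", "que")], [("text", "tal")]], 3, 10)

def Spec_get_left_with_sentence_bounds (words : List (List (String × String))) (center_index : Int) (max_count : Int) (out : List (List (String × String))) : Prop := out = get_left_with_sentence_bounds_alt words center_index max_count
instance (words : List (List (String × String))) (center_index : Int) (max_count : Int) (out : List (List (String × String))) : Decidable (Spec_get_left_with_sentence_bounds words center_index max_count out) := by unfold Spec_get_left_with_sentence_bounds; infer_instance

-- ===== CLAIM (what is proved, stated in full; the proofs are below) =====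
def Claim_equal_get_left_with_sentence_bounds : Prop := ∀ (words : List (List (String × String))) (center_index : Int) (max_count : Int), Dom_get_left_with_sentence_bounds words center_index max_count → Pre_get_left_with_sentence_bounds words center_index max_count → Spec_get_left_with_sentence_bounds words center_index max_count (get_left_with_sentence_bounds words center_index max_count)

-- ===== LEMMAS AND PROOFS =====

-- abbreviation used only by the proofs (definitionally the test both ports apply to a token)
def pvBdry (w : List (String × String)) : Bool :=
  pv_is_sentence_boundary (PySem.Dict.getD (PySem.Dict.mk w) "text" "")

theorem pv_takeWhile_take {α : Type} (q : α → Bool) (l : List α) (m : Nat) :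
    (l.take m).takeWhile q = (l.takeWhile q).take m := by
  induction l generalizing m with
  | nil => simp
  | cons x t ih =>
    cases m with
    | zero => simp
    | succ m =>
      by_cases hq : q x
      · simp [List.takeWhile_cons, hq, ih]
      · simp [List.takeWhile_cons, hq]

theorem pv_take_min {α : Type} (l : List α) (m : Nat) :
    l.take (min m l.length) = l.take m := by
  by_cases h : m ≤ l.length
  · rw [min_eq_left h]
  · rw [min_eq_right (by omega), List.take_length, List.take_of_length_le (by omega)]

theorem pv_enumerate_append_singleton {α : Type} (ys : List α) (w : α) (s : Int) :
    PySem.List.enumerate (ys ++ [w]) s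
      = PySem.List.enumerate ys s ++ [(s + ys.length, w)] := by
  induction ys generalizing s with
  | nil => simp [PySem.List.enumerate_nil, PySem.List.enumerate_cons]
  | cons y t ih =>
    simp [PySem.List.enumerate_cons, ih]
    ring_nf

-- A's loop computes: append the boundary-free prefix of the reversed left prefix, capped by the count.
theorem pv_leftLoop_eq (words : List (List (String × String))) (max_count : Int) :
    ∀ (idx steps : Int) (result : List (List (String × String))),
      idx < (words.length : Int) →
      pv_leftLoop words max_count idx steps result
        = result ++ (((words.take (idx + 1).toNat).reverse.takeWhile (fun w => !pvBdry w)).take (max_count - steps).toNat) := by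
  intro idx steps result hlen
  induction idx, steps, result using pv_leftLoop.induct words max_count with
  | case1 idx steps result h hget =>
    exfalso
    obtain ⟨h0, _⟩ := h
    rw [PySem.List.pyGet?_eq_some_getElem words h0 hlen] at hget
    exact (Option.some_ne_none _) hget
  | case2 idx steps result h w hget hb =>
    obtain ⟨h0, hs⟩ := h
    have hcond : 0 ≤ idx ∧ steps < max_count := ⟨h0, hs⟩
    rw [PySem.List.pyGet?_eq_some_getElem words h0 hlen] at hget
    have hw : words[idx.toNat] = w := Option.some.inj hget
    have hb2 : pvBdry w = true := hb
    have htake : words.take (idx + 1).toNat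
        = words.take idx.toNat ++ [words[idx.toNat]] := by
      have he : (idx + 1).toNat = idx.toNat + 1 := by omega
      rw [he, List.take_succ, List.getElem?_eq_getElem (by omega)]
      rfl
    rw [pv_leftLoop]
    simp only [dif_pos hcond, PySem.List.pyGet?_eq_some_getElem words h0 hlen]
    rw [htake, hw]
    simp [List.takeWhile_cons, hb2, hb]
  | case3 idx steps result h w hget hb ih =>
    obtain ⟨h0, hs⟩ := h
    have hcond : 0 ≤ idx ∧ steps < max_count := ⟨h0, hs⟩
    rw [PySem.List.pyGet?_eq_some_getElem words h0 hlen] at hget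
    have hw : words[idx.toNat] = w := Option.some.inj hget
    have hb2 : pvBdry w = false := Bool.of_not_eq_true hb
    have htake : words.take (idx + 1).toNat
        = words.take idx.toNat ++ [words[idx.toNat]] := by
      have he : (idx + 1).toNat = idx.toNat + 1 := by omega
      rw [he, List.take_succ, List.getElem?_eq_getElem (by omega)]
      rfl
    have hidx : (idx - 1 + 1).toNat = idx.toNat := by omega
    have hk : (max_count - steps).toNat = (max_count - (steps + 1)).toNat + 1 := by omega
    rw [pv_leftLoop]
    simp only [dif_pos hcond, PySem.List.pyGet?_eq_some_getElem words h0 hlen]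
    rw [htake, hw, ih (by omega), hidx]
    simp [List.takeWhile_cons, hb2, hk, Bool.of_not_eq_true hb]
  | case4 idx steps result h =>
    rw [pv_leftLoop]
    rw [dif_neg h]
    rcases (not_and_or.mp h) with h1 | h2
    · have he : (idx + 1).toNat = 0 := by omega
      simp [he]
    · have he : (max_count - steps).toNat = 0 := by omega
      simp [he]

-- B's boundary-locating fold, named for the proofs (defeq to the fold inside the port of B).
def pvSplitFold (zs : List (List (String × String))) : Int :=
  (PySem.List.enumerate zs).foldl (fun s iw => if pv_is_sentence_boundary (PySem.Dict.getD (PySem.Dict.mk iw.2) "text" "") then iw.1 else s) (-1)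

-- bounds of the split index and the meaning of the final slice
theorem pv_splitFold_spec (zs : List (List (String × String))) :
    -1 ≤ pvSplitFold zs ∧ pvSplitFold zs < (zs.length : Int) ∧
      zs.drop (pvSplitFold zs + 1).toNat = (zs.reverse.takeWhile (fun w => !pvBdry w)).reverse := by
  induction zs using List.reverseRecOn with
  | nil => simp [pvSplitFold, PySem.List.enumerate_nil]
  | append_singleton ys w ih =>
    obtain ⟨ih1, ih2, ih3⟩ := ih
    have he : pvSplitFold (ys ++ [w])
        = if pvBdry w then ((ys.length : Int)) else pvSplitFold ys := by
      simp only [pvSplitFold, pv_enumerate_append_singleton, List.foldl_append,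
        List.foldl_cons, List.foldl_nil, zero_add]
      rfl
    by_cases hb : pvBdry w
    · rw [he, if_pos hb]
      refine ⟨by omega, by simp, ?_⟩
      have hn : ((ys.length : Int) + 1).toNat = ys.length + 1 := by omega
      rw [hn]
      have hdrop : (ys ++ [w]).drop (ys.length + 1) = [] := by
        rw [List.drop_eq_nil_iff]; simp
      rw [hdrop]
      simp [List.takeWhile_cons, hb]
    · rw [he, if_neg hb]
      have hb2 : pvBdry w = false := Bool.of_not_eq_true hb
      refine ⟨ih1, by simp; omega, ?_⟩
      have hle : (pvSplitFold ys + 1).toNat ≤ ys.length := by omega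
      rw [List.drop_append_of_le_length hle]
      simp [List.takeWhile_cons, hb2, ih3]

-- ===== VERDICT (by name: the statement is the Claim_ definition above) =====
theorem get_left_with_sentence_bounds_spec : Claim_equal_get_left_with_sentence_bounds := by
  intro words ci mc _ hpre
  unfold Spec_get_left_with_sentence_bounds
  simp only [get_left_with_sentence_bounds, get_left_with_sentence_bounds_alt]
  -- name B's window
  set lo := max 0 (ci - mc) with hlo
  set hi := max 0 ci with hhi
  set window := PySem.List.slice words (some lo) (some hi) with hwin
  set s := ((PySem.List.enumerate window).foldl (fun s iw => if pv_is_sentence_boundary (PySem.Dict.getD (PySem.Dict.mk iw.2) "text" "") then iw.1 else s) (-1 : Int)) with hsdef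
  have hseq : s = pvSplitFold window := by rw [hsdef]; rfl
  obtain ⟨hs1, hs2, hs3⟩ := pv_splitFold_spec window
  rw [hseq]
  rw [PySem.List.slice_from window (by omega : (0:Int) ≤ pvSplitFold window + 1)]
  rw [hs3]
  -- window as a drop of the prefix P
  have hwin' : window = (words.take hi.toNat).drop lo.toNat := by
    rw [hwin, PySem.List.slice_toNat _ (by omega) (by omega), List.drop_take]
  rcases hpre with hci | hmc
  · by_cases hmc0 : mc ≤ 0
    · -- loop body never runs; window is empty
      have hA : pv_leftLoop words mc (ci - 1) 0 [] = [] := by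
        rw [pv_leftLoop, dif_neg (by omega)]
      have hW : window = [] := by
        rw [hwin']
        have : hi.toNat ≤ lo.toNat := by omega
        rw [List.drop_eq_nil_iff]
        calc (words.take hi.toNat).length ≤ hi.toNat := by simp
          _ ≤ lo.toNat := this
      rw [hA, hW]
      simp
    · push_neg at hmc0
      have hloop := pv_leftLoop_eq words mc (ci - 1) 0 [] (by omega)
      rw [hloop]
      have h1 : (ci - 1 + 1).toNat = ci.toNat := by omega
      have h2 : (mc - 0).toNat = mc.toNat := by omega
      rw [h1, h2]
      set P := words.take ci.toNat with hP
      have hPlen : P.length = ci.toNat := by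
        rw [hP, List.length_take]; omega
      have hwinP : window = P.drop (P.length - mc.toNat) := by
        rw [hwin', hP]
        have e1 : hi.toNat = ci.toNat := by omega
        have e2 : lo.toNat = P.length - mc.toNat := by rw [hPlen]; omega
        rw [e1, ← e2]
      have hrev : window.reverse = P.reverse.take mc.toNat := by
        rw [hwinP, List.reverse_drop]
        have : P.length - (P.length - mc.toNat) = min mc.toNat P.length := by omega
        rw [this]
        have := pv_take_min P.reverse mc.toNat
        simpa using this
      rw [hrev, pv_takeWhile_take]
      simp
  · -- max_count ≤ 0: same empty-window argument
    have hA : pv_leftLoop words mc (ci - 1) 0 [] = [] := by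
      rw [pv_leftLoop, dif_neg (by omega)]
    have hW : window = [] := by
      rw [hwin']
      have : hi.toNat ≤ lo.toNat := by omega
      rw [List.drop_eq_nil_iff]
      calc (words.take hi.toNat).length ≤ hi.toNat := by simp
        _ ≤ lo.toNat := this
    rw [hA, hW]
    simp
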